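-- pv_equiv track=rewrite | github.com/touunix/computational-complexity | linear_complexity/task_8.py | is_single_peak
-- ===== SOURCE A (Python) =====
-- def is_single_peak(array: list) -> tuple[bool, None] | tuple[bool, int]:
--     total_length: int = len(array)
--     if total_length < 3:
--         return False, None  # array must contain at least 3 elements to be a peak
--
--     index: int = 1
--     while index < total_length and array[index] > array[index - 1]:  # rising slope
--         index += 1
--
--     if index == total_length:  # check if there are some decreasing parts to consider as a peak
--         return False, None
--
--     while index < total_length and array[index] < array[index - 1]:  # slope
--         index += 1
--
--     if index != total_length:
--         return False, None  # there are numbers greater than the maximum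
--
--     height: int = max(array) - min(array)
--     return True, height
-- ===== SOURCE B (Python) =====
-- def is_single_peak(array: list):
--     n = len(array)
--     if n < 3:
--         return False, None
--     m = max(array)
--     p = array.index(m)
--     if p == n - 1:
--         return False, None  # no descending slope after the maximum
--     if all(array[k] < array[k + 1] for k in range(p)) and all(
--         array[k + 1] < array[k] for k in range(p, n - 1)
--     ):
--         return True, m - min(array)
--     return False, None
-- ===== Notes on version B (the rewrite author's own statement) =====
-- stated objective: alternative
-- what changed: B replaces A's two sequential while-loop slope walks with a find-the-extremum-first decomposition: compute max and its first index p, reject if p is the last index, then validate that the prefix up to p is strictly increasing and the suffix from p strictly decreasing.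
import Mathlib
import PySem

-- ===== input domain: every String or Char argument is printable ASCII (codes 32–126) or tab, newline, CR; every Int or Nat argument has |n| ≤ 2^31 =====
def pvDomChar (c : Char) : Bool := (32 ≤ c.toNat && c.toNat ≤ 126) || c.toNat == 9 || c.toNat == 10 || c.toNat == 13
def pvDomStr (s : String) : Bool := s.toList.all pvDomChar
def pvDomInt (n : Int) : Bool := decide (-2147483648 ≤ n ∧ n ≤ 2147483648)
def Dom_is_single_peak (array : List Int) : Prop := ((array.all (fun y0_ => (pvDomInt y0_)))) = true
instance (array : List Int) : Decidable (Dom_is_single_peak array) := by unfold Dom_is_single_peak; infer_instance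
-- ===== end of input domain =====

-- B finds the maximum and its first index, then validates the two strictly monotone runs
-- around it, instead of A's two sequential while-loop slope walks (objective: alternative decomposition).


-- ===== PORT A =====
-- first while loop: rising slope
def pyLoopUp (a : List Int) (n : Nat) (i : Nat) : Nat :=
  if _h : i < n ∧ a.getD i 0 > a.getD (i - 1) 0 then pyLoopUp a n (i + 1) else i
  termination_by n - i
  decreasing_by omega

-- second while loop: falling slope
def pyLoopDown (a : List Int) (n : Nat) (i : Nat) : Nat :=
  if _h : i < n ∧ a.getD i 0 < a.getD (i - 1) 0 then pyLoopDown a n (i + 1) else i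
  termination_by n - i
  decreasing_by omega

def is_single_peak (array : List Int) : Bool × Option Int :=
  let total_length := array.length
  if total_length < 3 then (false, none)
  else
    let index := pyLoopUp array total_length 1
    if index = total_length then (false, none)
    else
      let index2 := pyLoopDown array total_length index
      if index2 ≠ total_length then (false, none)
      else
        let height := (PySem.List.max? array (fun x => x)).getD 0 -
                      (PySem.List.min? array (fun x => x)).getD 0
        (true, some height)

-- ===== PORT B =====
def is_single_peak_alt (array : List Int) : Bool × Option Int :=
  let n := array.length
  if n < 3 then (false, none)
  else
    let m := (PySem.List.max? array (fun x => x)).getD 0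
    let p := (PySem.List.index? array m).getD 0
    if p = n - 1 then (false, none)  -- no descending slope after the maximum
    else
      if ((List.range p).all fun k => array.getD k 0 < array.getD (k + 1) 0) &&
         ((List.range' p (n - 1 - p)).all fun k => array.getD (k + 1) 0 < array.getD k 0) then
        (true, some (m - (PySem.List.min? array (fun x => x)).getD 0))
      else (false, none)

-- ===== PRECONDITION & SPEC =====
def Spec_is_single_peak (array : List Int) (out : Bool × Option Int) : Prop := out = is_single_peak_alt array
instance (array : List Int) (out : Bool × Option Int) : Decidable (Spec_is_single_peak array out) := by unfold Spec_is_single_peak; infer_instance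

-- ===== CLAIM (what is proved, stated in full; the proofs are below) =====
def Claim_equal_is_single_peak : Prop := ∀ (array : List Int), Dom_is_single_peak array → Spec_is_single_peak array (is_single_peak array)

-- ===== LEMMAS AND PROOFS =====

-- `Peak a p`: strictly increasing up to index p, strictly decreasing from p on
def Peak (a : List Int) (p : Nat) : Prop :=
  (∀ k, k < p → a.getD k 0 < a.getD (k + 1) 0) ∧
  (∀ k, p ≤ k → k + 1 < a.length → a.getD (k + 1) 0 < a.getD k 0)

theorem pyLoopUp_spec (a : List Int) (n : Nat) (i : Nat) (hin : i ≤ n) :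
    i ≤ pyLoopUp a n i ∧ pyLoopUp a n i ≤ n ∧
    (∀ k, i ≤ k → k < pyLoopUp a n i → a.getD (k - 1) 0 < a.getD k 0) ∧
    (pyLoopUp a n i < n → ¬ a.getD (pyLoopUp a n i - 1) 0 < a.getD (pyLoopUp a n i) 0) := by
  induction i using pyLoopUp.induct (a := a) (n := n) with
  | case1 i h ih =>
    rw [pyLoopUp, dif_pos h]
    obtain ⟨ih1, ih2, ih3, ih4⟩ := ih (by omega)
    refine ⟨by omega, ih2, ?_, ih4⟩
    intro k hk1 hk2
    rcases Nat.eq_or_lt_of_le hk1 with rfl | hlt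
    · exact h.2
    · exact ih3 k hlt hk2
  | case2 i h =>
    rw [pyLoopUp, dif_neg h]
    exact ⟨le_refl _, hin, fun k hk1 hk2 => absurd hk1 (by omega),
      fun hlt => fun hc => h ⟨hlt, hc⟩⟩

theorem pyLoopDown_spec (a : List Int) (n : Nat) (i : Nat) (hin : i ≤ n) :
    i ≤ pyLoopDown a n i ∧ pyLoopDown a n i ≤ n ∧
    (∀ k, i ≤ k → k < pyLoopDown a n i → a.getD k 0 < a.getD (k - 1) 0) ∧
    (pyLoopDown a n i < n → ¬ a.getD (pyLoopDown a n i) 0 < a.getD (pyLoopDown a n i - 1) 0) := by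
  induction i using pyLoopDown.induct (a := a) (n := n) with
  | case1 i h ih =>
    rw [pyLoopDown, dif_pos h]
    obtain ⟨ih1, ih2, ih3, ih4⟩ := ih (by omega)
    refine ⟨by omega, ih2, ?_, ih4⟩
    intro k hk1 hk2
    rcases Nat.eq_or_lt_of_le hk1 with rfl | hlt
    · exact h.2
    · exact ih3 k hlt hk2
  | case2 i h =>
    rw [pyLoopDown, dif_neg h]
    exact ⟨le_refl _, hin, fun k hk1 hk2 => absurd hk1 (by omega),
      fun hlt => fun hc => h ⟨hlt, hc⟩⟩

-- chained strict monotonicity on the rising side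
theorem peak_lt_left (a : List Int) (p : Nat) (h : ∀ k, k < p → a.getD k 0 < a.getD (k + 1) 0) :
    ∀ i j, i < j → j ≤ p → a.getD i 0 < a.getD j 0 := by
  intro i j
  induction j with
  | zero => omega
  | succ j ih =>
    intro hij hjp
    rcases Nat.lt_or_ge i j with hlt | hge
    · exact lt_trans (ih hlt (by omega)) (h j (by omega))
    · have : i = j := by omega
      subst this; exact h i (by omega)

-- chained strict monotonicity on the falling side
theorem peak_lt_right (a : List Int) (p : Nat)
    (h : ∀ k, p ≤ k → k + 1 < a.length → a.getD (k + 1) 0 < a.getD k 0) :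
    ∀ j, p < j → j < a.length → a.getD j 0 < a.getD p 0 := by
  intro j
  induction j with
  | zero => omega
  | succ j ih =>
    intro hpj hjn
    rcases Nat.lt_or_ge p j with hlt | hge
    · exact lt_trans (h j (by omega) hjn) (ih hlt (by omega))
    · have : p = j := by omega
      subst this; exact h p (le_refl _) hjn

theorem peak_strict_max (a : List Int) (p : Nat) (_hp : p < a.length) (hpk : Peak a p) :
    ∀ k, k < a.length → k ≠ p → a.getD k 0 < a.getD p 0 := by
  intro k hk hne
  rcases Nat.lt_or_ge k p with hlt | hge
  · exact peak_lt_left a p hpk.1 k p hlt (le_refl _)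
  · exact peak_lt_right a p hpk.2 k (by omega) hk

theorem max_eq_of_peak (a : List Int) (p : Nat) (hp : p < a.length) (hpk : Peak a p) :
    PySem.List.max? a (fun x => x) = some (a.getD p 0) := by
  have hmem : a.getD p 0 ∈ a := by
    rw [List.getD_eq_getElem a 0 hp]; exact List.getElem_mem hp
  have hne : a ≠ [] := by intro h; subst h; simp at hp
  obtain ⟨m, hm⟩ : ∃ m, PySem.List.max? a (fun x => x) = some m := by
    cases h : PySem.List.max? a (fun x => x) with
    | none => exact absurd ((PySem.List.max?_eq_none_iff a _).mp h) hne
    | some m => exact ⟨m, rfl⟩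
  have hmmem := PySem.List.max?_mem hm
  have hmax := PySem.List.max?_isMax hm
  obtain ⟨k, hk, hkm⟩ := List.mem_iff_getElem.mp hmmem
  rw [hm]
  congr 1
  by_cases hkp : k = p
  · subst hkp; rw [← hkm, List.getD_eq_getElem a 0 hk]
  · have h1 : a.getD k 0 < a.getD p 0 := peak_strict_max a p hp hpk k hk hkp
    have h2 : a.getD p 0 ≤ m := hmax _ hmem
    rw [List.getD_eq_getElem a 0 hk, hkm] at h1
    omega

theorem index_eq_of_peak (a : List Int) (p : Nat) (hp : p < a.length) (hpk : Peak a p) :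
    PySem.List.index? a (a.getD p 0) = some p := by
  rw [PySem.List.index?_eq_some_iff a _ p]
  refine ⟨a.take p, a.drop (p + 1), ?_, List.length_take_of_le (le_of_lt hp), ?_⟩
  · conv_lhs => rw [← List.take_append_drop p a]
    congr 1
    rw [List.getD_eq_getElem a 0 hp]
    exact (List.getElem_cons_drop hp).symm
  · intro hmem
    obtain ⟨k, hk, hkv⟩ := List.mem_iff_getElem.mp hmem
    have hkl : k < p := by
      have := hk; simp only [List.length_take] at this; omega
    rw [List.getElem_take] at hkv
    have := peak_strict_max a p hp hpk k (by omega) (by omega)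
    rw [List.getD_eq_getElem a 0 (by omega : k < a.length)] at this
    omega

-- A succeeds on a peaked array
theorem A_eq_of_peak (a : List Int) (h3 : ¬ a.length < 3) (p : Nat) (hp : p < a.length - 1)
    (hpk : Peak a p) :
    is_single_peak a = (true, some ((PySem.List.max? a (fun x => x)).getD 0 -
      (PySem.List.min? a (fun x => x)).getD 0)) := by
  have hn : 3 ≤ a.length := by omega
  obtain ⟨hu1, hu2, hu3, hu4⟩ := pyLoopUp_spec a a.length 1 (by omega)
  -- pyLoopUp stops exactly at p + 1
  have hup : pyLoopUp a a.length 1 = p + 1 := by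
    by_contra hne
    rcases Nat.lt_or_ge (pyLoopUp a a.length 1) (p + 1) with hlt | hge
    · have hfail := hu4 (by omega)
      have hr1 : 1 ≤ pyLoopUp a a.length 1 := hu1
      exact hfail (by
        have := hpk.1 (pyLoopUp a a.length 1 - 1) (by omega)
        have he : pyLoopUp a a.length 1 - 1 + 1 = pyLoopUp a a.length 1 := by omega
        rwa [he] at this)
    · have hcond := hu3 (p + 1) (by omega) (by omega)
      have hdec := hpk.2 p (le_refl _) (by omega)
      simp only [Nat.add_sub_cancel] at hcond
      omega
  obtain ⟨hd1, hd2, hd3, hd4⟩ := pyLoopDown_spec a a.length (p + 1) (by omega)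
  have hdown : pyLoopDown a a.length (p + 1) = a.length := by
    by_contra hne
    have hlt : pyLoopDown a a.length (p + 1) < a.length := by omega
    have hfail := hd4 hlt
    have := hpk.2 (pyLoopDown a a.length (p + 1) - 1) (by omega) (by omega)
    have he : pyLoopDown a a.length (p + 1) - 1 + 1 = pyLoopDown a a.length (p + 1) := by omega
    rw [he] at this
    exact hfail this
  simp only [is_single_peak, if_neg h3, hup, hdown]
  have : ¬ (p + 1 = a.length) := by omega
  simp [this]

-- A fails when no peak index exists
theorem A_eq_of_no_peak (a : List Int) (h3 : ¬ a.length < 3)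
    (hno : ¬ ∃ p, p < a.length - 1 ∧ Peak a p) :
    is_single_peak a = (false, none) := by
  have hn : 3 ≤ a.length := by omega
  obtain ⟨hu1, hu2, hu3, hu4⟩ := pyLoopUp_spec a a.length 1 (by omega)
  simp only [is_single_peak, if_neg h3]
  by_cases hr : pyLoopUp a a.length 1 = a.length
  · simp [hr]
  · simp only [if_neg hr]
    obtain ⟨hd1, hd2, hd3, hd4⟩ := pyLoopDown_spec a a.length (pyLoopUp a a.length 1) hu2
    by_cases hs : pyLoopDown a a.length (pyLoopUp a a.length 1) = a.length
    · exfalso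
      apply hno
      refine ⟨pyLoopUp a a.length 1 - 1, by omega, ?_, ?_⟩
      · intro k hk
        have := hu3 (k + 1) (by omega) (by omega)
        simpa using this
      · intro k hk1 hk2
        have := hd3 (k + 1) (by omega) (by rw [hs]; omega)
        simpa using this
    · simp [hs]

-- B succeeds on a peaked array
theorem B_eq_of_peak (a : List Int) (h3 : ¬ a.length < 3) (p : Nat) (hp : p < a.length - 1)
    (hpk : Peak a p) :
    is_single_peak_alt a = (true, some ((PySem.List.max? a (fun x => x)).getD 0 -
      (PySem.List.min? a (fun x => x)).getD 0)) := by
  have hplen : p < a.length := by omega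
  have hmax := max_eq_of_peak a p hplen hpk
  have hidx := index_eq_of_peak a p hplen hpk
  simp only [is_single_peak_alt, if_neg h3, hmax, Option.getD_some, hidx]
  have hne : ¬ (p = a.length - 1) := by omega
  rw [if_neg hne]
  have hchk1 : ((List.range p).all fun k => decide (a.getD k 0 < a.getD (k + 1) 0)) = true := by
    rw [List.all_eq_true]
    intro k hk
    simp only [decide_eq_true_eq]
    exact hpk.1 k (List.mem_range.mp hk)
  have hchk2 : ((List.range' p (a.length - 1 - p)).all
      fun k => decide (a.getD (k + 1) 0 < a.getD k 0)) = true := by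
    rw [List.all_eq_true]
    intro k hk
    simp only [decide_eq_true_eq]
    obtain ⟨hk1, hk2⟩ := List.mem_range'_1.mp hk
    exact hpk.2 k hk1 (by omega)
  have hcond : (((List.range p).all fun k => decide (a.getD k 0 < a.getD (k + 1) 0)) &&
      ((List.range' p (a.length - 1 - p)).all
        fun k => decide (a.getD (k + 1) 0 < a.getD k 0))) = true := by
    rw [Bool.and_eq_true]; exact ⟨hchk1, hchk2⟩
  rw [if_pos hcond]

-- B fails when no peak index exists
theorem B_eq_of_no_peak (a : List Int) (h3 : ¬ a.length < 3)
    (hno : ¬ ∃ p, p < a.length - 1 ∧ Peak a p) :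
    is_single_peak_alt a = (false, none) := by
  have hn : 3 ≤ a.length := by omega
  simp only [is_single_peak_alt, if_neg h3]
  set m := (PySem.List.max? a (fun x => x)).getD 0 with hm
  set p := (PySem.List.index? a m).getD 0 with hpdef
  by_cases hpl : p = a.length - 1
  · simp [hpl]
  · rw [if_neg hpl]
    -- p is a genuine index of a
    have hane : a ≠ [] := by intro h; subst h; simp at hn
    obtain ⟨m', hm'⟩ : ∃ m', PySem.List.max? a (fun x => x) = some m' := by
      cases h : PySem.List.max? a (fun x => x) with
      | none => exact absurd ((PySem.List.max?_eq_none_iff a _).mp h) hane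
      | some x => exact ⟨x, rfl⟩
    have hmm : m = m' := by rw [hm, hm', Option.getD_some]
    have hmem : m ∈ a := by rw [hmm]; exact PySem.List.max?_mem hm'
    obtain ⟨k, hk⟩ : ∃ k, PySem.List.index? a m = some k := by
      cases h : PySem.List.index? a m with
      | none => exact absurd ((PySem.List.index?_eq_none_iff a m).mp h) (by simp [hmem])
      | some k => exact ⟨k, rfl⟩
    obtain ⟨hklen, _, _⟩ := PySem.List.getElem_of_index?_eq_some hk
    have hpk : p = k := by rw [hpdef, hk, Option.getD_some]
    have hplen : p < a.length := by omega
    by_cases hchk : (((List.range p).all fun j => decide (a.getD j 0 < a.getD (j + 1) 0)) &&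
        ((List.range' p (a.length - 1 - p)).all
          fun j => decide (a.getD (j + 1) 0 < a.getD j 0))) = true
    · exfalso
      apply hno
      rw [Bool.and_eq_true] at hchk
      refine ⟨p, by omega, ?_, ?_⟩
      · intro j hj
        have := List.all_eq_true.mp hchk.1 j (List.mem_range.mpr hj)
        simpa using this
      · intro j hj1 hj2
        have := List.all_eq_true.mp hchk.2 j (List.mem_range'_1.mpr ⟨hj1, by omega⟩)
        simpa using this
    · rw [if_neg hchk]

-- ===== VERDICT (by name: the statement is the Claim_ definition above) =====
theorem is_single_peak_spec : Claim_equal_is_single_peak := by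
  intro a _
  unfold Spec_is_single_peak
  by_cases h3 : a.length < 3
  · simp [is_single_peak, is_single_peak_alt, h3]
  · by_cases hex : ∃ p, p < a.length - 1 ∧ Peak a p
    · obtain ⟨p, hp, hpk⟩ := hex
      rw [A_eq_of_peak a h3 p hp hpk, B_eq_of_peak a h3 p hp hpk]
    · rw [A_eq_of_no_peak a h3 hex, B_eq_of_no_peak a h3 hex]
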